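-- pv_equiv track=rewrite | github.com/berdzi/advent-of-code | 2022/day8/day8.py | get_visible_trees_in_rows
-- ===== SOURCE A (Python) =====
-- def is_visible(row,idx):
-- 	if idx==0 or idx==len(row)-1:
-- 		return True
-- 	else:
-- 		el=row[idx]
-- 		checked_list_row = [el]*len(row)
-- 		check_list = [int(a-b) for a, b in zip(row, checked_list_row)]
-- 		is_visible = all(x<0 for x in check_list[:idx]) or all(x<0 for x in check_list[idx+1:])
--
-- 	return is_visible
--
-- def get_visible_trees_in_rows(matrix):
-- 	out=[]
-- 	for row in matrix:
-- 		out_row=[]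
-- 		for i in range(len(row)):
-- 			v=is_visible(row,i)
-- 			out_row.append(v)
-- 		out.append(out_row)
-- 	return out
-- ===== SOURCE B (Python) =====
-- def get_visible_trees_in_rows(matrix):
--     def marks(row):
--         # one left-to-right pass: mark trees strictly taller than the running max
--         res = []
--         best = None
--         for el in row:
--             m = best is None or el > best
--             res.append(m)
--             if m:
--                 best = el
--         return res
--     out = []
--     for row in matrix:
--         left = marks(row)
--         right = marks(row[::-1])[::-1]
--         out.append([l or r for l, r in zip(left, right)])
--     return out
-- ===== Notes on version B (the rewrite author's own statement) =====
-- stated objective: faster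
-- what changed: Replaces the per-index O(n) visibility check (building a difference list and scanning both sides for every tree) with two running-maximum passes per row, combined element-wise.
import Mathlib
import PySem

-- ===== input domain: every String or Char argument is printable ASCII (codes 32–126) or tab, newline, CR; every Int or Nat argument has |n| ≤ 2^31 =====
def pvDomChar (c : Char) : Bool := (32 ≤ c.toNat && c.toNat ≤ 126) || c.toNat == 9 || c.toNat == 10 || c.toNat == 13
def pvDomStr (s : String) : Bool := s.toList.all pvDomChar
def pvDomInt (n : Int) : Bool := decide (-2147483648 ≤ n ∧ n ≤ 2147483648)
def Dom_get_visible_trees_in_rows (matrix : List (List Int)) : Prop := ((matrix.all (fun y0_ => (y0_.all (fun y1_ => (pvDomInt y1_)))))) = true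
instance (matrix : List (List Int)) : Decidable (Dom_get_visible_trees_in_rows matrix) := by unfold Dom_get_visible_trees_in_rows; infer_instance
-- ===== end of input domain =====

-- B replaces A's per-index O(n) two-sided scan with two running-maximum passes per row (asymptotically faster).

-- ===== PORT A =====
-- is_visible(row, idx): literal transliteration; the 'none' branch of row[idx] is Python's
-- IndexError, unreachable at the call sites below (0 ≤ idx < len(row)).
def pv_is_visible (row : List Int) (idx : Int) : Bool :=
  if idx == 0 || idx == PySem.List.len row - 1 then
    true
  else
    match PySem.List.pyGet? row idx with
    | none => false
    | some el =>
      let checked_list_row := List.replicate row.length el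
      let check_list := (row.zip checked_list_row).map (fun ab => ab.1 - ab.2)
      (PySem.List.slice check_list none (some idx)).all (fun x => decide (x < 0)) ||
      (PySem.List.slice check_list (some (idx + 1)) none).all (fun x => decide (x < 0))

def get_visible_trees_in_rows (matrix : List (List Int)) : List (List Bool) :=
  matrix.foldl
    (fun out row =>
      out ++ [(PySem.List.pyRange 0 (PySem.List.len row) 1).foldl
                (fun out_row i => out_row ++ [pv_is_visible row i]) []])
    []

-- ===== PORT B =====
-- marks(row) of Source B: one pass keeping the running max 'best'
-- "el is taller than the running max so far" ('best is None or el > best')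
def pv_beats (best : Option Int) (el : Int) : Bool :=
  match best with | none => true | some b => decide (b < el)

def pv_marks (best : Option Int) (row : List Int) : List Bool :=
  match row with
  | [] => []
  | el :: rest =>
    let m := pv_beats best el
    m :: pv_marks (if m then some el else best) rest

def get_visible_trees_in_rows_alt (matrix : List (List Int)) : List (List Bool) :=
  matrix.foldl
    (fun out row =>
      let left := pv_marks none row
      let right := (pv_marks none row.reverse).reverse  -- marks(row[::-1])[::-1]
      out ++ [List.zipWith (fun l r => l || r) left right])
    []

-- ===== PRECONDITION & SPEC =====
def Spec_get_visible_trees_in_rows (matrix : List (List Int)) (out : List (List Bool)) : Prop := out = get_visible_trees_in_rows_alt matrix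
instance (matrix : List (List Int)) (out : List (List Bool)) : Decidable (Spec_get_visible_trees_in_rows matrix out) := by unfold Spec_get_visible_trees_in_rows; infer_instance

-- ===== CLAIM (what is proved, stated in full; the proofs are below) =====
def Claim_equal_get_visible_trees_in_rows : Prop := ∀ (matrix : List (List Int)), Dom_get_visible_trees_in_rows matrix → Spec_get_visible_trees_in_rows matrix (get_visible_trees_in_rows matrix)


-- ===== LEMMAS AND PROOFS =====

theorem pv_marks_length (best : Option Int) (row : List Int) :
    (pv_marks best row).length = row.length := by
  induction row generalizing best with
  | nil => simp [pv_marks]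
  | cons x xs ih => simp [pv_marks, ih]

-- "x is taller than the running max" survives folding one more element into the max
theorem pv_beats_update (best : Option Int) (x v : Int) :
    pv_beats (if pv_beats best x then some x else best) v =
      (pv_beats best v && decide (x < v)) := by
  cases best with
  | none => simp [pv_beats]
  | some b =>
    simp only [pv_beats]
    by_cases hbx : b < x
    · rw [if_pos (by simp [hbx])]
      by_cases hxv : x < v
      · simp [hxv, lt_trans hbx hxv]
      · simp [hxv]
    · rw [if_neg (by simp [hbx])]
      by_cases hbv : b < v
      · simp [hbv, show x < v by omega]
      · simp [hbv]

-- pointwise characterisation of the running-max pass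
theorem pv_marks_get (best : Option Int) (row : List Int) (i : Nat) (h : i < row.length) :
    (pv_marks best row)[i]'(by rw [pv_marks_length]; exact h) =
      (pv_beats best row[i] && (row.take i).all (fun y => decide (y < row[i]))) := by
  induction row generalizing best i with
  | nil => simp at h
  | cons x xs ih =>
    cases i with
    | zero => simp [pv_marks]
    | succ i =>
      have hi : i < xs.length := Nat.lt_of_succ_lt_succ h
      simp only [pv_marks, List.getElem_cons_succ, List.take_succ_cons, List.all_cons]
      rw [ih _ i hi, pv_beats_update, Bool.and_assoc]
      rfl

theorem pv_zip_replicate (row : List Int) (el : Int) :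
    (row.zip (List.replicate row.length el)).map (fun ab => ab.1 - ab.2) =
      row.map (fun a => a - el) := by
  induction row with
  | nil => simp
  | cons x xs ih => simp [List.replicate_succ, ih]

-- A's is_visible at a valid index equals the two-sided "all smaller" test
theorem pv_is_visible_eq (row : List Int) (k : Nat) (h : k < row.length) :
    pv_is_visible row (k : Int) =
      ((row.take k).all (fun y => decide (y < row[k])) ||
       (row.drop (k + 1)).all (fun y => decide (y < row[k]))) := by
  unfold pv_is_visible
  by_cases h0 : (k : Int) = 0 ∨ (k : Int) = PySem.List.len row - 1
  · -- edge indices: A returns true; the right side is true because one scan is empty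
    have hb : ((k : Int) == 0 || (k : Int) == PySem.List.len row - 1) = true := by
      rcases h0 with h0 | h0 <;> simp [h0]
    rw [if_pos hb]
    rcases h0 with h0 | h0
    · have hk : k = 0 := by exact_mod_cast h0
      subst hk; simp
    · have hk : k = row.length - 1 := by
        simp [PySem.List.len_eq] at h0; omega
      have hd : row.drop (k + 1) = [] := List.drop_eq_nil_of_le (by omega)
      simp [hd]
  · have hb : ((k : Int) == 0 || (k : Int) == PySem.List.len row - 1) = false := by
      rw [not_or] at h0
      simp only [PySem.List.len_eq] at h0
      simp only [PySem.List.len_eq, Bool.or_eq_false_iff, beq_eq_false_iff_ne]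
      exact ⟨by exact_mod_cast h0.1, h0.2⟩
    rw [if_neg (by rw [hb]; simp)]
    have hget : PySem.List.pyGet? row (k : Int) = some row[k] := by
      simp [List.getElem?_eq_getElem h]
    rw [hget]
    simp only [pv_zip_replicate]
    have hs1 : PySem.List.slice (row.map (fun a => a - row[k])) none (some (k : Int))
        = (row.map (fun a => a - row[k])).take k := PySem.List.slice_to_natCast _ _
    have hs2 : PySem.List.slice (row.map (fun a => a - row[k])) (some ((k : Int) + 1)) none
        = (row.map (fun a => a - row[k])).drop (k + 1) := by
      have := PySem.List.slice_from_natCast (row.map (fun a => a - row[k])) (k + 1)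
      simpa [Nat.cast_add] using this
    rw [hs1, hs2, ← List.map_take, ← List.map_drop]
    simp only [List.all_map, Function.comp_def]
    have hfun : (fun y : Int => decide (y - row[k] < 0)) = (fun y => decide (y < row[k])) := by
      funext y; exact decide_eq_decide.mpr (by omega)
    rw [hfun]

-- per-row equality of the two algorithms
theorem pv_row_eq (row : List Int) :
    (PySem.List.pyRange 0 (PySem.List.len row) 1).foldl
        (fun out_row i => out_row ++ [pv_is_visible row i]) [] =
      List.zipWith (fun l r => l || r) (pv_marks none row) ((pv_marks none row.reverse).reverse) := by
  rw [PySem.List.foldl_append_singleton_eq_map, List.nil_append]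
  apply List.ext_getElem
  · simp [PySem.List.length_pyRange_one, PySem.List.len_eq, pv_marks_length]
  · intro k hk hk'
    have hkn : k < row.length := by
      simpa [PySem.List.length_pyRange_one, PySem.List.len_eq] using hk
    have hn1 : row.length - 1 - k < row.reverse.length := by simp; omega
    rw [List.getElem_map, List.getElem_zipWith, PySem.List.getElem_pyRange_one]
    rw [show (0 : Int) + (k : Int) = (k : Int) by ring]
    rw [pv_is_visible_eq row k hkn]
    have hL : (pv_marks none row)[k]'(by rw [pv_marks_length]; exact hkn)
        = (row.take k).all (fun y => decide (y < row[k])) := by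
      rw [pv_marks_get none row k hkn]; rfl
    have hRrev : ((pv_marks none row.reverse).reverse)[k]'(by simp [pv_marks_length]; exact hkn)
        = (pv_marks none row.reverse)[row.length - 1 - k]'(by rw [pv_marks_length]; simpa using hn1) := by
      rw [List.getElem_reverse]
      congr 1
      simp [pv_marks_length]
    have hrevget : row.reverse[row.length - 1 - k]'hn1 = row[k] := by
      rw [List.getElem_reverse]
      congr 1
      omega
    have htake : row.reverse.take (row.length - 1 - k) = (row.drop (k + 1)).reverse := by
      rw [List.take_reverse]
      rw [show row.length - (row.length - 1 - k) = k + 1 from by omega]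
    have hR : ((pv_marks none row.reverse).reverse)[k]'(by simp [pv_marks_length]; exact hkn)
        = (row.drop (k + 1)).all (fun y => decide (y < row[k])) := by
      rw [hRrev, pv_marks_get none row.reverse (row.length - 1 - k) hn1]
      simp only [hrevget, htake, List.all_reverse, pv_beats, Bool.true_and]
    rw [hL, hR]

-- ===== VERDICT (by name: the statement is the Claim_ definition above) =====
theorem get_visible_trees_in_rows_spec : Claim_equal_get_visible_trees_in_rows := by
  intro matrix _
  unfold Spec_get_visible_trees_in_rows get_visible_trees_in_rows get_visible_trees_in_rows_alt
  rw [PySem.List.foldl_append_singleton_eq_map, PySem.List.foldl_append_singleton_eq_map,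
    List.nil_append, List.nil_append]
  apply List.map_congr_left
  intro row _
  exact pv_row_eq row
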